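-- pv_equiv track=rewrite | github.com/mikewolfd/formspec | tests/unit/test_lint_rule_registry.py | _strip_test_modules
-- ===== SOURCE A (Python) =====
-- def _strip_test_modules(rust_source: str) -> str:
--     """Remove `#[cfg(test)] mod tests { ... }` blocks so code literals inside
--     test fixtures don't get counted as emission sites.
--
--     Caveat: brace depth is computed with raw character counts, so `{` / `}`
--     inside a string literal inside a test module can unbalance the walker.
--     This is acceptable today because no such literal exists — see
--     `test_strip_test_modules_handles_literal_braces_in_strings` for the
--     adversarial regression guard.
--     """
--     lines = rust_source.splitlines()
--     out: list[str] = []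
--     i = 0
--     while i < len(lines):
--         line = lines[i]
--         if "#[cfg(test)]" in line:
--             # Skip until we hit a matching `mod <name> {` and consume its body.
--             j = i + 1
--             while j < len(lines) and "mod " not in lines[j]:
--                 j += 1
--             if j >= len(lines):
--                 break
--             # Walk brace depth to find the end of the module.
--             depth = 0
--             started = False
--             k = j
--             while k < len(lines):
--                 depth += lines[k].count("{") - lines[k].count("}")
--                 if "{" in lines[k]:
--                     started = True
--                 if started and depth == 0:
--                     break
--                 k += 1
--             i = k + 1
--             continue
--         out.append(line)
--         i += 1
--     return "\n".join(out)
-- ===== SOURCE B (Python) =====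
-- def _strip_test_modules(rust_source: str) -> str:
--     """Single forward pass with an explicit mode state instead of nested
--     index-jumping while-loops."""
--     out = []
--     mode = 0  # 0 = copy, 1 = awaiting mod line, 2 = inside module body
--     depth = 0
--     started = False
--     for line in rust_source.splitlines():
--         if mode == 0:
--             if "#[cfg(test)]" in line:
--                 mode = 1
--             else:
--                 out.append(line)
--         elif mode == 1:
--             if "mod " in line:
--                 depth = line.count("{") - line.count("}")
--                 started = "{" in line
--                 mode = 0 if (started and depth == 0) else 2
--         else:
--             depth += line.count("{") - line.count("}")
--             if "{" in line:
--                 started = True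
--             if started and depth == 0:
--                 mode = 0
--     return "\n".join(out)
-- ===== Notes on version B (the rewrite author's own statement) =====
-- stated objective: simpler
-- what changed: Replaces A's three nested index-jumping while-loops (outer scan plus inner mod-search and brace-walk with i=k+1 jumps) by a single forward pass over the lines carrying an explicit mode state (copy / awaiting-mod / in-module) with depth and started counters.
import Mathlib
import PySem

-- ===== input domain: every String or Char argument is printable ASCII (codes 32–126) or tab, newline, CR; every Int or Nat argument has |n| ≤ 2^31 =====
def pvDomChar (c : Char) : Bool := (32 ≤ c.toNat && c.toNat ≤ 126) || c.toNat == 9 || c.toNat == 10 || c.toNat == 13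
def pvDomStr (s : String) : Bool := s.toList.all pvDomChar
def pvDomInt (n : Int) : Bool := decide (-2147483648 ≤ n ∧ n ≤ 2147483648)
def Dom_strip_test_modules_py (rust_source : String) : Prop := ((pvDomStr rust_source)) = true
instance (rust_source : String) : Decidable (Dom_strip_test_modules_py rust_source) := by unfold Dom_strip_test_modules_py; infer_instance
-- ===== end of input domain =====

-- B replaces A's three nested index-jumping while-loops by one forward pass carrying a
-- mode state (copy / awaiting-mod / in-module); same return value, objective: simpler.

-- ===== PORT A =====
-- (fuel is only a totality device: each loop gets lines.length fuel, always enough)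
-- inner loop `while j < len(lines) and "mod " not in lines[j]: j += 1` (returns final j)
def pvFindModF (lines : List String) : Nat → Nat → Nat
  | 0, j => j
  | fuel + 1, j =>
    if j < lines.length then
      if PySem.Str.isIn "mod " (lines.getD j "") then j else pvFindModF lines fuel (j + 1)
    else j

-- inner loop `while k < len(lines): …` walking brace depth (returns final k: the break
-- index, or ≥ lines.length when the loop exits normally)
def pvWalkF (lines : List String) : Nat → Nat → Int → Bool → Nat
  | 0, k, _, _ => k
  | fuel + 1, k, depth, started =>
    if k < lines.length then
      let line := lines.getD k ""
      let d := depth + (PySem.Str.count line "{" : Int) - (PySem.Str.count line "}" : Int)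
      let s := started || PySem.Str.isIn "{" line
      if s && (d == 0) then k else pvWalkF lines fuel (k + 1) d s
    else k

-- outer `while i < len(lines)` loop of A
def pvALoopF (lines : List String) : Nat → Nat → List String → List String
  | 0, _, out => out
  | fuel + 1, i, out =>
    if i < lines.length then
      let line := lines.getD i ""
      if PySem.Str.isIn "#[cfg(test)]" line then
        let j := pvFindModF lines lines.length (i + 1)
        if lines.length ≤ j then out
        else pvALoopF lines fuel (pvWalkF lines lines.length j 0 false + 1) out
      else pvALoopF lines fuel (i + 1) (out ++ [line])
    else out

def strip_test_modules_py (rust_source : String) : String :=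
  let lines := PySem.Str.splitlines rust_source
  PySem.Str.join "\n" (pvALoopF lines lines.length 0 [])

-- ===== PORT B =====
-- state: (mode, depth, started, out); mode 0 = copy, 1 = awaiting mod line, 2 = in module
def pvStep (st : Nat × Int × Bool × List String) (line : String) :
    Nat × Int × Bool × List String :=
  match st with
  | (mode, depth, started, out) =>
    if mode == 0 then
      if PySem.Str.isIn "#[cfg(test)]" line then (1, depth, started, out)
      else (0, depth, started, out ++ [line])
    else if mode == 1 then
      if PySem.Str.isIn "mod " line then
        let d := (PySem.Str.count line "{" : Int) - (PySem.Str.count line "}" : Int)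
        let s := PySem.Str.isIn "{" line
        (if s && (d == 0) then 0 else 2, d, s, out)
      else (1, depth, started, out)
    else
      let d := depth + (PySem.Str.count line "{" : Int) - (PySem.Str.count line "}" : Int)
      let s := started || PySem.Str.isIn "{" line
      (if s && (d == 0) then 0 else 2, d, s, out)

def strip_test_modules_py_alt (rust_source : String) : String :=
  PySem.Str.join "\n"
    ((PySem.Str.splitlines rust_source).foldl pvStep (0, 0, false, [])).2.2.2

-- ===== PRECONDITION & SPEC =====
def Spec_strip_test_modules_py (rust_source : String) (out : String) : Prop := out = strip_test_modules_py_alt rust_source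
instance (rust_source : String) (out : String) : Decidable (Spec_strip_test_modules_py rust_source out) := by unfold Spec_strip_test_modules_py; infer_instance

-- ===== CLAIM (what is proved, stated in full; the proofs are below) =====
def Claim_equal_strip_test_modules_py : Prop := ∀ (rust_source : String), Dom_strip_test_modules_py rust_source → Spec_strip_test_modules_py rust_source (strip_test_modules_py rust_source)

-- ===== LEMMAS AND PROOFS =====

-- one-step unfoldings of A's loops under "enough fuel"
theorem pvFindModF_step (lines : List String) (ff j : Nat) (hj : j < lines.length)
    (hf : lines.length - j ≤ ff) :
    pvFindModF lines ff j =
      (if PySem.Str.isIn "mod " (lines.getD j "") then j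
       else pvFindModF lines (ff - 1) (j + 1)) := by
  cases ff with
  | zero => omega
  | succ f => simp only [pvFindModF, if_pos hj, Nat.add_sub_cancel]

theorem pvWalkF_step (lines : List String) (fw k : Nat) (d : Int) (s : Bool)
    (hk : k < lines.length) (hf : lines.length - k ≤ fw) :
    pvWalkF lines fw k d s =
      (if ((s || PySem.Str.isIn "{" (lines.getD k "")) &&
            ((d + (PySem.Str.count (lines.getD k "") "{" : Int)
              - (PySem.Str.count (lines.getD k "") "}" : Int)) == 0)) = true
       then k
       else pvWalkF lines (fw - 1) (k + 1)
         (d + (PySem.Str.count (lines.getD k "") "{" : Int)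
            - (PySem.Str.count (lines.getD k "") "}" : Int))
         (s || PySem.Str.isIn "{" (lines.getD k ""))) := by
  cases fw with
  | zero => omega
  | succ f => simp only [pvWalkF, if_pos hk, Nat.add_sub_cancel]

theorem pvALoopF_step (lines : List String) (fa i : Nat) (out : List String)
    (hi : i < lines.length) (hf : lines.length - i ≤ fa) :
    pvALoopF lines fa i out =
      (if PySem.Str.isIn "#[cfg(test)]" (lines.getD i "") then
        (if lines.length ≤ pvFindModF lines lines.length (i + 1) then out
         else pvALoopF lines (fa - 1)
           (pvWalkF lines lines.length (pvFindModF lines lines.length (i + 1)) 0 false + 1) out)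
       else pvALoopF lines (fa - 1) (i + 1) (out ++ [lines.getD i ""])) := by
  cases fa with
  | zero => omega
  | succ f => simp only [pvALoopF, if_pos hi, Nat.add_sub_cancel]

-- recursive view of B's fold, for the induction
def pvRun (ls : List String) (mode : Nat) (depth : Int) (started : Bool)
    (out : List String) : List String :=
  match ls with
  | [] => out
  | l :: ls' =>
    let st := pvStep (mode, depth, started, out) l
    pvRun ls' st.1 st.2.1 st.2.2.1 st.2.2.2

theorem pvRun_cons (l : String) (ls : List String) (m : Nat) (d : Int) (s : Bool)
    (out : List String) :
    pvRun (l :: ls) m d s out =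
      pvRun ls (pvStep (m, d, s, out) l).1 (pvStep (m, d, s, out) l).2.1
        (pvStep (m, d, s, out) l).2.2.1 (pvStep (m, d, s, out) l).2.2.2 := rfl

theorem pvFoldl_eq_run (ls : List String) (mode : Nat) (depth : Int) (started : Bool)
    (out : List String) :
    (ls.foldl pvStep (mode, depth, started, out)).2.2.2 = pvRun ls mode depth started out := by
  induction ls generalizing mode depth started out with
  | nil => rfl
  | cons l ls ih =>
    rw [List.foldl_cons, pvRun_cons]
    obtain ⟨m, d, s, o⟩ := pvStep (mode, depth, started, out) l
    exact ih m d s o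

theorem pvMain (lines : List String) (n : Nat) :
    (∀ (i : Nat) (d : Int) (s : Bool) (out : List String) (fa : Nat),
        lines.length - i ≤ n → lines.length - i ≤ fa →
        pvALoopF lines fa i out = pvRun (lines.drop i) 0 d s out) ∧
    (∀ (x : Nat) (d : Int) (s : Bool) (out : List String) (ff fa : Nat),
        lines.length - x ≤ n → lines.length - x ≤ ff → lines.length - x ≤ fa + 1 →
        pvRun (lines.drop x) 1 d s out =
          (if lines.length ≤ pvFindModF lines ff x then out
           else pvALoopF lines fa
             (pvWalkF lines lines.length (pvFindModF lines ff x) 0 false + 1) out)) ∧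
    (∀ (k : Nat) (d : Int) (s : Bool) (out : List String) (fw fa : Nat),
        lines.length - k ≤ n → lines.length - k ≤ fw → lines.length - k ≤ fa + 1 →
        pvRun (lines.drop k) 2 d s out =
          pvALoopF lines fa (pvWalkF lines fw k d s + 1) out) := by
  induction n with
  | zero =>
    refine ⟨?_, ?_, ?_⟩
    · intro i d s out fa hle _
      have hge : lines.length ≤ i := by omega
      rw [List.drop_eq_nil_of_le hge, pvRun]
      cases fa with
      | zero => rfl
      | succ f => simp only [pvALoopF, if_neg (by omega : ¬ i < lines.length)]
    · intro x d s out ff fa hle hff _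
      have hge : lines.length ≤ x := by omega
      rw [List.drop_eq_nil_of_le hge, pvRun]
      have hf : pvFindModF lines ff x = x := by
        cases ff with
        | zero => rfl
        | succ f => simp only [pvFindModF, if_neg (by omega : ¬ x < lines.length)]
      rw [hf, if_pos hge]
    · intro k d s out fw fa hle hfw _
      have hge : lines.length ≤ k := by omega
      rw [List.drop_eq_nil_of_le hge, pvRun]
      have hw : pvWalkF lines fw k d s = k := by
        cases fw with
        | zero => rfl
        | succ f => simp only [pvWalkF, if_neg (by omega : ¬ k < lines.length)]
      rw [hw]
      cases fa with
      | zero => rfl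
      | succ f => simp only [pvALoopF, if_neg (by omega : ¬ k + 1 < lines.length)]
  | succ n ih =>
    obtain ⟨ihP, ihQ, ihR⟩ := ih
    refine ⟨?_, ?_, ?_⟩
    · -- copy mode
      intro i d s out fa hle hfa
      by_cases h : i < lines.length
      · have hget : lines.getD i "" = lines[i] := List.getD_eq_getElem lines "" h
        have hdrop : lines.drop i = lines[i] :: lines.drop (i + 1) :=
          (List.getElem_cons_drop h).symm
        rw [hdrop, pvRun_cons, pvALoopF_step lines fa i out h hfa, hget]
        by_cases hc : PySem.Str.isIn "#[cfg(test)]" lines[i] = true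
        · have hst : pvStep (0, d, s, out) lines[i] = (1, d, s, out) := by
            simp only [pvStep, Nat.reduceBEq, beq_self_eq_true, if_true, if_false,
              Bool.false_eq_true, hc]
          rw [hst]
          simp only [hc, if_true]
          exact (ihQ (i + 1) d s out lines.length (fa - 1) (by omega) (by omega) (by omega)).symm
        · have hst : pvStep (0, d, s, out) lines[i] = (0, d, s, out ++ [lines[i]]) := by
            simp only [pvStep, Nat.reduceBEq, beq_self_eq_true, if_true, if_false,
              Bool.false_eq_true, hc]
          rw [hst]
          simp only [hc, if_false, Bool.false_eq_true]
          exact ihP (i + 1) d s (out ++ [lines[i]]) (fa - 1) (by omega) (by omega)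
      · rw [List.drop_eq_nil_of_le (by omega), pvRun]
        cases fa with
        | zero => rfl
        | succ f => simp only [pvALoopF, if_neg h]
    · -- awaiting-mod mode
      intro x d s out ff fa hle hff hfa
      by_cases h : x < lines.length
      · have hget : lines.getD x "" = lines[x] := List.getD_eq_getElem lines "" h
        have hdrop : lines.drop x = lines[x] :: lines.drop (x + 1) :=
          (List.getElem_cons_drop h).symm
        rw [hdrop, pvRun_cons]
        by_cases hm : PySem.Str.isIn "mod " lines[x] = true
        · have hf : pvFindModF lines ff x = x := by
            rw [pvFindModF_step lines ff x h hff, hget, if_pos hm]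
          rw [hf, if_neg (by omega),
            pvWalkF_step lines lines.length x 0 false h (by omega), hget]
          simp only [zero_add, Bool.false_or]
          by_cases hbr : (PySem.Str.isIn "{" lines[x] &&
              (((PySem.Str.count lines[x] "{" : Int) - (PySem.Str.count lines[x] "}" : Int)) == 0)) = true
          · have hst : pvStep (1, d, s, out) lines[x] =
                (0, (PySem.Str.count lines[x] "{" : Int) - (PySem.Str.count lines[x] "}" : Int),
                  PySem.Str.isIn "{" lines[x], out) := by
              simp only [pvStep, Nat.reduceBEq, beq_self_eq_true, if_true, if_false,
                Bool.false_eq_true, hm, hbr]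
            rw [hst, if_pos hbr]
            exact (ihP (x + 1) _ _ out fa (by omega) (by omega)).symm
          · have hst : pvStep (1, d, s, out) lines[x] =
                (2, (PySem.Str.count lines[x] "{" : Int) - (PySem.Str.count lines[x] "}" : Int),
                  PySem.Str.isIn "{" lines[x], out) := by
              simp only [pvStep, Nat.reduceBEq, beq_self_eq_true, if_true, if_false,
                Bool.false_eq_true, hm, hbr]
            rw [hst, if_neg hbr]
            exact ihR (x + 1) _ _ out (lines.length - 1) fa (by omega) (by omega) (by omega)
        · have hf : pvFindModF lines ff x = pvFindModF lines (ff - 1) (x + 1) := by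
            rw [pvFindModF_step lines ff x h hff, hget, if_neg hm]
          have hst : pvStep (1, d, s, out) lines[x] = (1, d, s, out) := by
            simp only [pvStep, Nat.reduceBEq, beq_self_eq_true, if_true, if_false,
              Bool.false_eq_true, hm]
          rw [hst, hf]
          exact ihQ (x + 1) d s out (ff - 1) fa (by omega) (by omega) (by omega)
      · rw [List.drop_eq_nil_of_le (by omega), pvRun]
        have hf : pvFindModF lines ff x = x := by
          cases ff with
          | zero => rfl
          | succ f => simp only [pvFindModF, if_neg h]
        rw [hf, if_pos (by omega)]
    · -- in-module mode
      intro k d s out fw fa hle hfw hfa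
      by_cases h : k < lines.length
      · have hget : lines.getD k "" = lines[k] := List.getD_eq_getElem lines "" h
        have hdrop : lines.drop k = lines[k] :: lines.drop (k + 1) :=
          (List.getElem_cons_drop h).symm
        rw [hdrop, pvRun_cons, pvWalkF_step lines fw k d s h hfw, hget]
        by_cases hbr : ((s || PySem.Str.isIn "{" lines[k]) &&
            ((d + (PySem.Str.count lines[k] "{" : Int) - (PySem.Str.count lines[k] "}" : Int)) == 0)) = true
        · have hst : pvStep (2, d, s, out) lines[k] =
              (0, d + (PySem.Str.count lines[k] "{" : Int) - (PySem.Str.count lines[k] "}" : Int),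
                s || PySem.Str.isIn "{" lines[k], out) := by
            simp only [pvStep, Nat.reduceBEq, if_true, if_false, Bool.false_eq_true, hbr]
          rw [hst, if_pos hbr]
          exact (ihP (k + 1) _ _ out fa (by omega) (by omega)).symm
        · have hst : pvStep (2, d, s, out) lines[k] =
              (2, d + (PySem.Str.count lines[k] "{" : Int) - (PySem.Str.count lines[k] "}" : Int),
                s || PySem.Str.isIn "{" lines[k], out) := by
            simp only [pvStep, Nat.reduceBEq, if_true, if_false, Bool.false_eq_true, hbr]
          rw [hst, if_neg hbr]
          exact ihR (k + 1) _ _ out (fw - 1) fa (by omega) (by omega) (by omega)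
      · rw [List.drop_eq_nil_of_le (by omega), pvRun]
        have hw : pvWalkF lines fw k d s = k := by
          cases fw with
          | zero => rfl
          | succ f => simp only [pvWalkF, if_neg h]
        rw [hw]
        cases fa with
        | zero => rfl
        | succ f => simp only [pvALoopF, if_neg (by omega : ¬ k + 1 < lines.length)]

-- ===== VERDICT (by name: the statement is the Claim_ definition above) =====
theorem strip_test_modules_py_spec : Claim_equal_strip_test_modules_py := by
  intro rust_source _
  unfold Spec_strip_test_modules_py strip_test_modules_py strip_test_modules_py_alt
  show PySem.Str.join "\n" (pvALoopF (PySem.Str.splitlines rust_source)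
      (PySem.Str.splitlines rust_source).length 0 []) = _
  congr 1
  rw [pvFoldl_eq_run]
  have hmain := (pvMain (PySem.Str.splitlines rust_source)
      (PySem.Str.splitlines rust_source).length).1
    0 0 false [] (PySem.Str.splitlines rust_source).length (by omega) (by omega)
  rw [List.drop_zero] at hmain
  exact hmain
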